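-- pv_equiv track=rewrite | github.com/kcharellano/LcAns | ByPattern/ShortestPath/01Matrix.py | bfs
-- ===== SOURCE A (Python) =====
-- from collections import deque
--
-- def bfs(startRow, startCol, rowSize, colSize, matrix):
--     queue = deque([(startRow, startCol, 0)])
--     visited = set()
--     # up, down, left, right
--     directions = [(1, 0), (-1, 0), (0, -1), (0, 1)]
--     while queue:
--         row, col, steps = queue.popleft()
--
--         # cell is out of range
--         if row < 0 or row >= rowSize or col < 0 or col >= colSize:
--             continue
--
--         # goal condition
--         if matrix[row][col] == 0:
--             return steps
--
--         visited.add((row,col))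
--
--         # continue bfs to next level
--         for d in directions:
--             nextRow = row + d[0]
--             nextCol = col + d[1]
--             if (nextRow, nextCol) not in visited:
--                 queue.append((nextRow, nextCol, steps+1))
--
--     return -1
-- ===== SOURCE B (Python) =====
-- def bfs(startRow, startCol, rowSize, colSize, matrix):
--     # Closed-form: with no obstacles, BFS distance to the nearest 0 equals the
--     # minimum Manhattan distance from the start to any in-range 0 cell.
--     if startRow < 0 or startRow >= rowSize or startCol < 0 or startCol >= colSize:
--         return -1
--     best = -1
--     for r in range(rowSize):
--         for c in range(colSize):
--             if matrix[r][c] == 0: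
--                 d = abs(r - startRow) + abs(c - startCol)
--                 if best == -1 or d < best:
--                     best = d
--     return best
-- ===== Notes on version B (the rewrite author's own statement) =====
-- stated objective: alternative
-- what changed: Replaces the queue+visited BFS (which re-enqueues cells unmarked, duplicating entries) by a closed form: every cell is passable, so the answer is the minimum Manhattan distance from the start to any in-range zero cell, computed by one row-major scan of the grid.
-- outside the precondition, e.g. on bfs(0, 0, 2, 2, [[0]]): A returns 0, B raises IndexError
import Mathlib
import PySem

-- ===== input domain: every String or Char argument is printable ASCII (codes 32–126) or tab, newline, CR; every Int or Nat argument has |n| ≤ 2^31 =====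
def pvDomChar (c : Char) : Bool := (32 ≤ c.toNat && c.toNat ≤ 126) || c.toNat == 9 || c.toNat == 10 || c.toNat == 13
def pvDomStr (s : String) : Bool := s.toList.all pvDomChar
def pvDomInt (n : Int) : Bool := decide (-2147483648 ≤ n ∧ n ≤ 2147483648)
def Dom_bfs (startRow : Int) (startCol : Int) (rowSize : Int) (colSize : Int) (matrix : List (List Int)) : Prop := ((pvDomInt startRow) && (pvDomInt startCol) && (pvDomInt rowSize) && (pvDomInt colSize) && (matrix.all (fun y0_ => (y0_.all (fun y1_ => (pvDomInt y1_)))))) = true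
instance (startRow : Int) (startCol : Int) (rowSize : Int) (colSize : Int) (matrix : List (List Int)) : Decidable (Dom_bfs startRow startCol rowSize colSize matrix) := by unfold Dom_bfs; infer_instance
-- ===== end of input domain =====

-- B replaces A's queue+visited BFS by a closed-form scan: with every cell
-- passable, the BFS distance equals the minimum Manhattan distance from the
-- start to an in-range zero cell (a genuinely different algorithm, same cost).

-- ===== PORT A =====

-- matrix[r][c] (none = IndexError in Python; such accesses are outside Pre_)
def pvVal (matrix : List (List Int)) (r c : Int) : Option Int :=
  (PySem.List.pyGet? matrix r).bind (fun row => PySem.List.pyGet? row c)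

def pvDirs : List (Int × Int) := [(1, 0), (-1, 0), (0, -1), (0, 1)]

-- in-range cells whose value is not 0 (termination measure component)
def pvFree (R C : Int) (M : List (List Int)) : List (Int × Int) :=
  (PySem.List.pyRange 0 R 1).flatMap (fun r =>
    (PySem.List.pyRange 0 C 1).filterMap (fun c =>
      if pvVal M r c = some 0 then none else some (r, c)))

def pvM1 (R C : Int) (M : List (List Int)) (v : List (Int × Int)) : Nat :=
  ((pvFree R C M).filter (fun p => decide (p ∉ v))).length

def pvM2 (q : List (Int × Int × Int)) (v : List (Int × Int)) : Nat :=
  (q.filter (fun e => decide ((e.1, e.2.1) ∈ v))).length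

lemma pvFilter_le {α : Type} (l : List α) (p q : α → Bool)
    (h : ∀ a ∈ l, q a = true → p a = true) :
    (l.filter q).length ≤ (l.filter p).length := by
  induction l with
  | nil => simp
  | cons x xs ih =>
    have hx := h x (by simp)
    have ih' := ih (fun a ha => h a (by simp [ha]))
    by_cases hq : q x = true
    · simp [hq, hx hq]; omega
    · cases hp : p x <;> simp [hq, hp] <;> omega

lemma pvFilter_lt {α : Type} (l : List α) (p q : α → Bool)
    (h : ∀ a ∈ l, q a = true → p a = true)
    (x : α) (hx : x ∈ l) (hpx : p x = true) (hqx : q x = false) :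
    (l.filter q).length < (l.filter p).length := by
  induction l with
  | nil => simp at hx
  | cons y ys ih =>
    have ih' : ∀ a ∈ ys, q a = true → p a = true := fun a ha => h a (by simp [ha])
    rcases List.mem_cons.mp hx with rfl | hxy
    · have hle := pvFilter_le ys p q ih'
      simp [hpx, hqx]; omega
    · have := ih ih' hxy
      by_cases hq : q y = true
      · simp [hq, h y (by simp) hq]; omega
      · cases hp : p y <;> simp [hq, hp] <;> omega

lemma pvMem_pvFree (R C : Int) (M : List (List Int)) (r c : Int) :
    (r, c) ∈ pvFree R C M ↔ 0 ≤ r ∧ r < R ∧ 0 ≤ c ∧ c < C ∧ ¬ pvVal M r c = some 0 := by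
  simp only [pvFree, List.mem_flatMap, List.mem_filterMap, PySem.List.mem_pyRange_one]
  constructor
  · rintro ⟨r', hr', c', hc', h⟩
    split at h
    · simp at h
    · simp only [Option.some.injEq, Prod.mk.injEq] at h
      obtain ⟨rfl, rfl⟩ := h
      exact ⟨hr'.1, hr'.2, hc'.1, hc'.2, by assumption⟩
  · rintro ⟨h1, h2, h3, h4, h5⟩
    exact ⟨r, ⟨h1, h2⟩, c, ⟨h3, h4⟩, by simp [h5]⟩

lemma pvM2_cons_mem (q : List (Int × Int × Int)) (v : List (Int × Int)) (row col steps : Int)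
    (hv : (row, col) ∈ v) : pvM2 ((row, col, steps) :: q) v = pvM2 q v + 1 := by
  simp [pvM2, hv]

lemma pvM2_cons_not_mem (q : List (Int × Int × Int)) (v : List (Int × Int)) (row col steps : Int)
    (hv : (row, col) ∉ v) : pvM2 ((row, col, steps) :: q) v = pvM2 q v := by
  simp [pvM2, hv]

lemma pvM2_append (a b : List (Int × Int × Int)) (v : List (Int × Int)) :
    pvM2 (a ++ b) v = pvM2 a v + pvM2 b v := by
  simp [pvM2, List.filter_append]

lemma pvM2_pushes_nil (v : List (Int × Int)) (w : List (Int × Int)) (row col steps : Int)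
    (hw : ∀ p : Int × Int, p ∈ v → p ∈ w) :
    pvM2 (pvDirs.filterMap (fun d =>
      if (row + d.1, col + d.2) ∈ w then none
      else some (row + d.1, col + d.2, steps + 1))) v = 0 := by
  simp only [pvM2, List.length_eq_zero_iff, List.filter_eq_nil_iff]
  intro e he
  simp only [List.mem_filterMap] at he
  obtain ⟨d, _, hif⟩ := he
  by_cases hmem : (row + d.1, col + d.2) ∈ w
  · rw [if_pos hmem] at hif; exact absurd hif (by simp)
  · rw [if_neg hmem] at hif
    injection hif with h
    subst h
    simp only [decide_eq_true_eq]
    exact fun hin => hmem (hw _ hin)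

def bfsLoop (R C : Int) (M : List (List Int)) (q : List (Int × Int × Int))
    (v : PySem.Set (Int × Int)) : Int :=
  match q with
  | [] => -1
  | (row, col, steps) :: rest =>
    if row < 0 ∨ R ≤ row ∨ col < 0 ∨ C ≤ col then
      bfsLoop R C M rest v
    else if pvVal M row col = some 0 then steps
    else
      bfsLoop R C M
        (rest ++ pvDirs.filterMap (fun d =>
          if (row + d.1, col + d.2) ∈ PySem.Set.add v (row, col) then none
          else some (row + d.1, col + d.2, steps + 1)))
        (PySem.Set.add v (row, col))
termination_by (pvM1 R C M v, pvM2 q v, q.length)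
decreasing_by
  · -- out-of-range pop
    apply Prod.Lex.right
    by_cases hv : (row, col) ∈ v
    · apply Prod.Lex.left
      rw [pvM2_cons_mem _ _ _ _ _ hv]
      omega
    · rw [pvM2_cons_not_mem _ _ _ _ _ hv]
      apply Prod.Lex.right
      simp
  · -- in-range, non-zero pop
    simp only [dite_eq_ite]
    by_cases hv : (row, col) ∈ v
    · have hadd : PySem.Set.add v (row, col) = v := PySem.Set.add_of_mem hv
      rw [hadd]
      apply Prod.Lex.right
      apply Prod.Lex.left
      rw [pvM2_append, pvM2_pushes_nil v v row col steps (fun p hp => hp),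
        pvM2_cons_mem _ _ _ _ _ hv]
      omega
    · apply Prod.Lex.left
      refine pvFilter_lt _ _ _ ?_ (row, col) ?_ ?_ ?_
      · intro a _ ha
        simp only [decide_eq_true_eq, PySem.Set.mem_add] at ha ⊢
        exact fun hm => ha (Or.inl hm)
      · rw [pvMem_pvFree]
        rename_i hrange hzero
        simp only [not_or, not_lt, not_le] at hrange
        exact ⟨hrange.1, by omega, hrange.2.2.1, by omega, hzero⟩
      · simp only [decide_eq_true_eq]
        exact hv
      · simp [PySem.Set.mem_add]

def bfs (startRow : Int) (startCol : Int) (rowSize : Int) (colSize : Int) (matrix : List (List Int)) : Int :=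
  bfsLoop rowSize colSize matrix [(startRow, startCol, 0)] PySem.Set.empty

-- ===== PORT B =====
def bfs_alt (startRow : Int) (startCol : Int) (rowSize : Int) (colSize : Int) (matrix : List (List Int)) : Int :=
  if startRow < 0 ∨ rowSize ≤ startRow ∨ startCol < 0 ∨ colSize ≤ startCol then -1
  else
    (PySem.List.pyRange 0 rowSize 1).foldl (fun best r =>
      (PySem.List.pyRange 0 colSize 1).foldl (fun best c =>
        if pvVal matrix r c = some 0 then
          let d := |r - startRow| + |c - startCol|
          if best = -1 ∨ d < best then d else best
        else best) best) (-1)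

-- ===== PRECONDITION & SPEC =====
-- Pre_ excludes inputs whose matrix does not actually contain rowSize×colSize entries
-- (when the start is in range): A raises IndexError on most of them and returns on a
-- few only because its early return happens to touch existing cells.
def Pre_bfs (startRow : Int) (startCol : Int) (rowSize : Int) (colSize : Int) (matrix : List (List Int)) : Prop :=
  (0 ≤ startRow ∧ startRow < rowSize ∧ 0 ≤ startCol ∧ startCol < colSize) →
    (rowSize ≤ (matrix.length : Int) ∧
      ∀ row ∈ matrix.take rowSize.toNat, colSize ≤ (row.length : Int))
instance (startRow : Int) (startCol : Int) (rowSize : Int) (colSize : Int) (matrix : List (List Int)) : Decidable (Pre_bfs startRow startCol rowSize colSize matrix) := by unfold Pre_bfs; infer_instance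

def pvWitness_bfs : Int × Int × Int × Int × List (List Int) := (0, 0, 2, 2, [[1, 1], [1, 0]])

def Spec_bfs (startRow : Int) (startCol : Int) (rowSize : Int) (colSize : Int) (matrix : List (List Int)) (out : Int) : Prop := out = bfs_alt startRow startCol rowSize colSize matrix
instance (startRow : Int) (startCol : Int) (rowSize : Int) (colSize : Int) (matrix : List (List Int)) (out : Int) : Decidable (Spec_bfs startRow startCol rowSize colSize matrix out) := by unfold Spec_bfs; infer_instance

-- ===== CLAIM (what is proved, stated in full; the proofs are below) =====
def Claim_equal_bfs : Prop := ∀ (startRow : Int) (startCol : Int) (rowSize : Int) (colSize : Int) (matrix : List (List Int)), Dom_bfs startRow startCol rowSize colSize matrix → Pre_bfs startRow startCol rowSize colSize matrix → Spec_bfs startRow startCol rowSize colSize matrix (bfs startRow startCol rowSize colSize matrix)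

-- ===== LEMMAS AND PROOFS =====

-- in-range predicate, Manhattan distance, zero cells, neighbour list
def pvInR (R C : Int) (p : Int × Int) : Prop := 0 ≤ p.1 ∧ p.1 < R ∧ 0 ≤ p.2 ∧ p.2 < C

def pvDist (sr sc : Int) (p : Int × Int) : Nat := (p.1 - sr).natAbs + (p.2 - sc).natAbs

def pvZero (R C : Int) (M : List (List Int)) (p : Int × Int) : Prop :=
  pvInR R C p ∧ pvVal M p.1 p.2 = some 0

def pvNbrs (p : Int × Int) : List (Int × Int) := pvDirs.map (fun d => (p.1 + d.1, p.2 + d.2))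

lemma pvDistI (sr sc : Int) (p : Int × Int) :
    |p.1 - sr| + |p.2 - sc| = ((pvDist sr sc p : Nat) : Int) := by
  rw [Int.abs_eq_natAbs, Int.abs_eq_natAbs]; unfold pvDist; push_cast; ring

lemma pvDist_zero (sr sc : Int) (p : Int × Int) (h : pvDist sr sc p = 0) : p = (sr, sc) := by
  unfold pvDist at h; rw [Prod.ext_iff]; constructor <;> [skip; skip] <;> simp <;> omega

lemma pvAdj_dist (sr sc : Int) (y p : Int × Int) (h : p ∈ pvNbrs y) :
    pvDist sr sc p ≤ pvDist sr sc y + 1 := by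
  simp only [pvNbrs, pvDirs, List.map_cons, List.map_nil, List.mem_cons,
    List.not_mem_nil, or_false] at h
  rcases h with h | h | h | h <;> rw [Prod.ext_iff] at h <;> unfold pvDist <;>
    obtain ⟨h1, h2⟩ := h <;> omega

lemma pvDist_one_mem (sr sc : Int) (p : Int × Int) (h : pvDist sr sc p = 1) :
    p ∈ pvNbrs (sr, sc) := by
  simp only [pvNbrs, pvDirs, List.map_cons, List.map_nil, List.mem_cons,
    List.not_mem_nil, or_false, Prod.ext_iff]
  unfold pvDist at h; omega

lemma pvStep_toward (sr sc R C : Int) (hs : pvInR R C (sr, sc)) (p : Int × Int)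
    (hp : pvInR R C p) (hd : 0 < pvDist sr sc p) :
    ∃ y, pvInR R C y ∧ pvDist sr sc y + 1 = pvDist sr sc p ∧ p ∈ pvNbrs y := by
  unfold pvInR at hs hp
  unfold pvDist at hd ⊢
  by_cases h1 : sr < p.1
  · refine ⟨(p.1 - 1, p.2), ⟨by omega, by omega, hp.2.2.1, hp.2.2.2⟩, by simp; omega, ?_⟩
    simp only [pvNbrs, pvDirs, List.map_cons, List.map_nil, List.mem_cons,
      List.not_mem_nil, or_false, Prod.ext_iff]; omega
  · by_cases h2 : p.1 < sr
    · refine ⟨(p.1 + 1, p.2), ⟨by omega, by omega, hp.2.2.1, hp.2.2.2⟩, by simp; omega, ?_⟩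
      simp only [pvNbrs, pvDirs, List.map_cons, List.map_nil, List.mem_cons,
        List.not_mem_nil, or_false, Prod.ext_iff]; omega
    · by_cases h3 : sc < p.2
      · refine ⟨(p.1, p.2 - 1), ⟨hp.1, hp.2.1, by omega, by omega⟩, by simp; omega, ?_⟩
        simp only [pvNbrs, pvDirs, List.map_cons, List.map_nil, List.mem_cons,
          List.not_mem_nil, or_false, Prod.ext_iff]; omega
      · by_cases h4 : p.2 < sc
        · refine ⟨(p.1, p.2 + 1), ⟨hp.1, hp.2.1, by omega, by omega⟩, by simp; omega, ?_⟩
          simp only [pvNbrs, pvDirs, List.map_cons, List.map_nil, List.mem_cons,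
            List.not_mem_nil, or_false, Prod.ext_iff]; omega
        · omega

lemma pvDescent (sr sc R C : Int) (hs : pvInR R C (sr, sc)) :
    ∀ (n : Nat) (p : Int × Int), pvInR R C p → pvDist sr sc p = n →
      ∀ k, k ≤ n → ∃ q, pvInR R C q ∧ pvDist sr sc q = k := by
  intro n
  induction n with
  | zero => intro p hp hd k hk; exact ⟨p, hp, by omega⟩
  | succ n ih =>
    intro p hp hd k hk
    by_cases hk' : k = n + 1
    · exact ⟨p, hp, by omega⟩
    · obtain ⟨y, hy, hdy, _⟩ := pvStep_toward sr sc R C hs p hp (by omega)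
      exact ih y hy (by omega) k (by omega)

-- membership in the pushed-entries list
lemma pvMem_pushes (row col steps : Int) (w : List (Int × Int)) (e : Int × Int × Int)
    (he : e ∈ pvDirs.filterMap (fun d =>
      if (row + d.1, col + d.2) ∈ w then none
      else some (row + d.1, col + d.2, steps + 1))) :
    (e.1, e.2.1) ∈ pvNbrs (row, col) ∧ e.2.2 = steps + 1 ∧ (e.1, e.2.1) ∉ w := by
  simp only [List.mem_filterMap] at he
  obtain ⟨d, hd, hif⟩ := he
  by_cases hmem : (row + d.1, col + d.2) ∈ w
  · rw [if_pos hmem] at hif; exact absurd hif (by simp)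
  · rw [if_neg hmem] at hif
    injection hif with h
    subst h
    refine ⟨?_, rfl, hmem⟩
    simp only [pvNbrs]
    exact List.mem_map.mpr ⟨d, hd, rfl⟩

lemma pvPushes_mem (row col steps : Int) (w : List (Int × Int)) (p : Int × Int)
    (hp : p ∈ pvNbrs (row, col)) (hw : p ∉ w) :
    (p.1, p.2, steps + 1) ∈ pvDirs.filterMap (fun d =>
      if (row + d.1, col + d.2) ∈ w then none
      else some (row + d.1, col + d.2, steps + 1)) := by
  simp only [pvNbrs] at hp
  obtain ⟨d, hd, hpd⟩ := List.mem_map.mp hp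
  refine List.mem_filterMap.mpr ⟨d, hd, ?_⟩
  subst hpd
  simp [hw]

-- the loop invariant (s = current BFS level; A = level-s entries, B = level-(s+1) entries)
structure pvInv (sr sc R C : Int) (M : List (List Int)) (s : Nat)
    (A B : List (Int × Int × Int)) (v : List (Int × Int)) : Prop where
  hA : ∀ e ∈ A, e.2.2 = (s : Int) ∧ pvDist sr sc (e.1, e.2.1) ≤ s
  hB : ∀ e ∈ B, e.2.2 = (s : Int) + 1 ∧ pvDist sr sc (e.1, e.2.1) ≤ s + 1
  hv : ∀ p ∈ v, pvInR R C p ∧ pvVal M p.1 p.2 ≠ some 0 ∧ pvDist sr sc p ≤ s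
  hz : ∀ p, pvZero R C M p → s ≤ pvDist sr sc p
  hfr : ∀ p, pvInR R C p → pvDist sr sc p = s → p ∈ v ∨ (p.1, p.2, (s : Int)) ∈ A
  hnx : ∀ p, pvInR R C p → pvDist sr sc p = s + 1 →
    (p.1, p.2, (s : Int) + 1) ∈ B ∨
    ∃ y, pvInR R C y ∧ pvDist sr sc y = s ∧ p ∈ pvNbrs y ∧ (y.1, y.2, (s : Int)) ∈ A

lemma pvInv_shift (sr sc R C : Int) (M : List (List Int)) (s : Nat)
    (B : List (Int × Int × Int)) (v : List (Int × Int))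
    (hs : pvInR R C (sr, sc)) (H : pvInv sr sc R C M s [] B v) :
    pvInv sr sc R C M (s + 1) B [] v := by
  constructor
  · intro e he
    obtain ⟨h1, h2⟩ := H.hB e he
    constructor
    · rw [h1]; push_cast; ring
    · omega
  · intro e he; simp at he
  · intro p hp
    obtain ⟨h1, h2, h3⟩ := H.hv p hp
    exact ⟨h1, h2, by omega⟩
  · intro p hp
    have h1 := H.hz p hp
    by_cases hd : pvDist sr sc p = s
    · rcases H.hfr p hp.1 hd with hvm | hA
      · exact absurd hp.2 (H.hv p hvm).2.1
      · simp at hA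
    · omega
  · intro p hp hd
    rcases H.hnx p hp (by omega) with hB | ⟨y, _, _, _, hyA⟩
    · right
      push_cast
      exact hB
    · simp at hyA
  · intro p hp hd
    obtain ⟨y, hyR, hyd, hyn⟩ := pvStep_toward sr sc R C hs p hp (by omega)
    rcases H.hnx y hyR (by omega) with hyB | ⟨y', _, _, _, hyA⟩
    · right
      refine ⟨y, hyR, by omega, hyn, ?_⟩
      push_cast
      exact hyB
    · simp at hyA

lemma pvInv_init (sr sc R C : Int) (M : List (List Int)) (hs : pvInR R C (sr, sc)) :
    pvInv sr sc R C M 0 [(sr, sc, 0)] [] [] := by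
  constructor
  · intro e he
    simp only [List.mem_singleton] at he
    subst he
    exact ⟨rfl, by unfold pvDist; simp⟩
  · intro e he; simp at he
  · intro p hp; simp at hp
  · intro p _; omega
  · intro p _ hd
    have := pvDist_zero sr sc p hd
    subst this
    right; simp
  · intro p hp hd
    right
    refine ⟨(sr, sc), hs, by unfold pvDist; simp, pvDist_one_mem sr sc p (by omega), by simp⟩

lemma pvInv_norm (sr sc R C : Int) (M : List (List Int)) (v : List (Int × Int))
    (hs : pvInR R C (sr, sc)) (e : Int × Int × Int) (rest : List (Int × Int × Int)) :
    (∃ s A B, e :: rest = A ++ B ∧ pvInv sr sc R C M s A B v) →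
    ∃ s A' B', e :: rest = A' ++ B' ∧ A' ≠ [] ∧ pvInv sr sc R C M s A' B' v := by
  rintro ⟨s, A, B, hq, H⟩
  cases A with
  | nil =>
    simp only [List.nil_append] at hq
    exact ⟨s + 1, B, [], by simp [hq], by simp [← hq], pvInv_shift sr sc R C M s B v hs H⟩
  | cons a A => exact ⟨s, a :: A, B, hq, by simp, H⟩

-- the main loop lemma: under the invariant the loop returns T
lemma pvLoop_eq (sr sc R C : Int) (M : List (List Int)) (T : Int)
    (hs : pvInR R C (sr, sc))
    (hT1 : (∀ p, ¬ pvZero R C M p) → T = -1)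
    (hT2 : ∀ p, pvZero R C M p →
      (∀ q, pvZero R C M q → pvDist sr sc p ≤ pvDist sr sc q) → T = (pvDist sr sc p : Int)) :
    ∀ q v, (∃ s A B, q = A ++ B ∧ pvInv sr sc R C M s A B v) → bfsLoop R C M q v = T := by
  intro q v
  induction q, v using bfsLoop.induct R C M with
  | case1 v =>
    rintro ⟨s, A, B, hq, H⟩
    obtain ⟨hA, hB⟩ := List.append_eq_nil_iff.mp hq.symm
    subst hA; subst hB
    rw [bfsLoop]
    symm
    apply hT1
    intro p hp
    have hzn := H.hz p hp
    by_cases hd : pvDist sr sc p = s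
    · rcases H.hfr p hp.1 hd with hvm | hmem
      · exact (H.hv p hvm).2.1 hp.2
      · simp at hmem
    · obtain ⟨q', hq', hdq'⟩ :=
        pvDescent sr sc R C hs (pvDist sr sc p) p hp.1 rfl (s + 1) (by omega)
      rcases H.hnx q' hq' hdq' with h | ⟨y, _, _, _, hyA⟩
      · simp at h
      · simp at hyA
  | case2 v row col steps rest hcond IH =>
    intro hex
    obtain ⟨s, A', B', hq, hne, H⟩ := pvInv_norm sr sc R C M v hs _ _ hex
    cases A' with
    | nil => exact absurd rfl hne
    | cons a A0 =>
      simp only [List.cons_append, List.cons.injEq] at hq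
      obtain ⟨ha, hrest⟩ := hq
      subst ha
      rw [bfsLoop]
      simp only [if_pos hcond]
      apply IH
      refine ⟨s, A0, B', hrest, ?_⟩
      have hR : ¬ pvInR R C (row, col) := by unfold pvInR; simp only []; omega
      constructor
      · exact fun e he => H.hA e (by simp [he])
      · exact H.hB
      · exact H.hv
      · exact H.hz
      · intro p hp hd
        rcases H.hfr p hp hd with hvm | hmem
        · exact Or.inl hvm
        · rcases List.mem_cons.mp hmem with heq | hmem'
          · exfalso
            apply hR
            have h1 : p.1 = row := by exact congrArg Prod.fst heq
            have h2 : p.2 = col := by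
              have := congrArg Prod.snd heq
              exact congrArg Prod.fst this
            rw [← h1, ← h2]
            exact hp
          · exact Or.inr hmem'
      · intro p hp hd
        rcases H.hnx p hp hd with hB | ⟨y, hyR, hyd, hyn, hyA⟩
        · exact Or.inl hB
        · rcases List.mem_cons.mp hyA with heq | hmem'
          · exfalso
            apply hR
            have h1 : y.1 = row := by exact congrArg Prod.fst heq
            have h2 : y.2 = col := by
              have := congrArg Prod.snd heq
              exact congrArg Prod.fst this
            rw [← h1, ← h2]
            exact hyR
          · exact Or.inr ⟨y, hyR, hyd, hyn, hmem'⟩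
  | case3 v row col steps rest hcond hzero =>
    intro hex
    obtain ⟨s, A', B', hq, hne, H⟩ := pvInv_norm sr sc R C M v hs _ _ hex
    cases A' with
    | nil => exact absurd rfl hne
    | cons a A0 =>
      simp only [List.cons_append, List.cons.injEq] at hq
      obtain ⟨ha, hrest⟩ := hq
      subst ha
      rw [bfsLoop]
      rw [if_neg hcond, if_pos hzero]
      have hR : pvInR R C (row, col) := by unfold pvInR; simp only []; omega
      obtain ⟨hst, hdle⟩ := H.hA (row, col, steps) (by simp)
      simp only [] at hst hdle
      have hzp : pvZero R C M (row, col) := ⟨hR, hzero⟩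
      have hge := H.hz (row, col) hzp
      have hdeq : pvDist sr sc (row, col) = s := by omega
      have := hT2 (row, col) hzp (fun q hq => by rw [hdeq]; exact H.hz q hq)
      rw [this, hdeq, hst]
  | case4 v row col steps rest hcond hzero IH =>
    intro hex
    obtain ⟨s, A', B', hq, hne, H⟩ := pvInv_norm sr sc R C M v hs _ _ hex
    cases A' with
    | nil => exact absurd rfl hne
    | cons a A0 =>
      simp only [List.cons_append, List.cons.injEq] at hq
      obtain ⟨ha, hrest⟩ := hq
      subst ha
      rw [bfsLoop]
      rw [if_neg hcond, if_neg hzero]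
      have hR : pvInR R C (row, col) := by unfold pvInR; simp only []; omega
      obtain ⟨hst, hdle⟩ := H.hA (row, col, steps) (by simp)
      simp only [] at hst hdle
      simp only [dite_eq_ite] at IH
      apply IH
      refine ⟨s, A0, B' ++ pvDirs.filterMap (fun d =>
        if (row + d.1, col + d.2) ∈ PySem.Set.add v (row, col) then none
        else some (row + d.1, col + d.2, steps + 1)), ?_, ?_⟩
      · rw [hrest, List.append_assoc]
      constructor
      · exact fun e he => H.hA e (by simp [he])
      · intro e he
        rcases List.mem_append.mp he with he' | he'
        · exact H.hB e he'
        · obtain ⟨hn, hstep, _⟩ := pvMem_pushes row col steps _ e he'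
          refine ⟨by rw [hstep, hst], ?_⟩
          have := pvAdj_dist sr sc (row, col) (e.1, e.2.1) hn
          omega
      · intro p hp
        rcases (PySem.Set.mem_add _ _ _).mp hp with hp' | hp'
        · exact H.hv p hp'
        · subst hp'
          exact ⟨hR, hzero, hdle⟩
      · exact H.hz
      · intro p hpR hd
        rcases H.hfr p hpR hd with hvm | hmem
        · exact Or.inl ((PySem.Set.mem_add _ _ _).mpr (Or.inl hvm))
        · rcases List.mem_cons.mp hmem with heq | hmem'
          · left
            apply (PySem.Set.mem_add _ _ _).mpr
            right
            have h1 : p.1 = row := congrArg Prod.fst heq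
            have h2 : p.2 = col := congrArg Prod.fst (congrArg Prod.snd heq)
            rw [Prod.ext_iff]; exact ⟨h1, h2⟩
          · exact Or.inr hmem'
      · intro p hpR hd
        rcases H.hnx p hpR hd with hB | ⟨y, hyR, hyd, hyn, hyA⟩
        · exact Or.inl (List.mem_append.mpr (Or.inl hB))
        · rcases List.mem_cons.mp hyA with heq | hmem'
          · left
            apply List.mem_append.mpr
            right
            have h1 : y.1 = row := congrArg Prod.fst heq
            have h2 : y.2 = col := congrArg Prod.fst (congrArg Prod.snd heq)
            have hyeq : y = (row, col) := by rw [Prod.ext_iff]; exact ⟨h1, h2⟩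
            have hpn : p ∈ pvNbrs (row, col) := by rw [← hyeq]; exact hyn
            have hpv : p ∉ PySem.Set.add v (row, col) := by
              intro hmem
              rcases (PySem.Set.mem_add _ _ _).mp hmem with hin | hin
              · have := (H.hv p hin).2.2; omega
              · rw [hin] at hd; omega
            have := pvPushes_mem row col steps _ p hpn hpv
            have hcast : steps + 1 = (s : Int) + 1 := by rw [hst]
            rw [← hcast]
            exact this
          · exact Or.inr ⟨y, hyR, hyd, hyn, hmem'⟩

-- ===== B side: the scan computes the minimum Manhattan distance to a zero cell =====

def pvStep (sr sc : Int) (M : List (List Int)) (best : Int) (p : Int × Int) : Int :=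
  if pvVal M p.1 p.2 = some 0 then
    if best = -1 ∨ |p.1 - sr| + |p.2 - sc| < best then |p.1 - sr| + |p.2 - sc| else best
  else best

def pvCL (R C : Int) : List (Int × Int) :=
  (PySem.List.pyRange 0 R 1).flatMap (fun r => (PySem.List.pyRange 0 C 1).map (fun c => (r, c)))

lemma pvFoldl_flatMap {α β γ : Type} (l : List α) (g : α → List β) (f : γ → β → γ) :
    ∀ b : γ, (l.flatMap g).foldl f b = l.foldl (fun acc a => (g a).foldl f acc) b := by
  induction l with
  | nil => intro b; simp
  | cons x xs ih => intro b; simp [List.flatMap_cons, List.foldl_append, ih]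

lemma pvMem_pvCL (R C : Int) (p : Int × Int) : p ∈ pvCL R C ↔ pvInR R C p := by
  simp only [pvCL, List.mem_flatMap, List.mem_map, PySem.List.mem_pyRange_one, pvInR]
  constructor
  · rintro ⟨r, hr, c, hc, rfl⟩
    exact ⟨hr.1, hr.2, hc.1, hc.2⟩
  · rintro ⟨h1, h2, h3, h4⟩
    exact ⟨p.1, ⟨h1, h2⟩, p.2, ⟨h3, h4⟩, rfl⟩

lemma pvAlt_eq_fold (sr sc R C : Int) (M : List (List Int))
    (h : ¬(sr < 0 ∨ R ≤ sr ∨ sc < 0 ∨ C ≤ sc)) :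
    bfs_alt sr sc R C M = (pvCL R C).foldl (pvStep sr sc M) (-1) := by
  unfold bfs_alt
  rw [if_neg h, pvCL, pvFoldl_flatMap]
  congr 1
  funext acc r
  rw [List.foldl_map]
  rfl

lemma pvFold_spec (sr sc : Int) (M : List (List Int)) :
    ∀ (cl : List (Int × Int)) (b : Int), (b = -1 ∨ 0 ≤ b) →
      (cl.foldl (pvStep sr sc M) b = b ∨
        ∃ p ∈ cl, pvVal M p.1 p.2 = some 0 ∧
          cl.foldl (pvStep sr sc M) b = (pvDist sr sc p : Int)) ∧
      (∀ p ∈ cl, pvVal M p.1 p.2 = some 0 →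
        cl.foldl (pvStep sr sc M) b ≤ (pvDist sr sc p : Int)) ∧
      (0 ≤ b → cl.foldl (pvStep sr sc M) b ≤ b) ∧
      (((∃ p ∈ cl, pvVal M p.1 p.2 = some 0) ∨ 0 ≤ b) → 0 ≤ cl.foldl (pvStep sr sc M) b) := by
  intro cl
  induction cl with
  | nil =>
    intro b hb
    refine ⟨Or.inl rfl, by simp, fun h => le_refl _, ?_⟩
    rintro (⟨p, hp, _⟩ | h)
    · simp at hp
    · simpa using h
  | cons p0 cl ih =>
    intro b hb
    have hd0 : (0 : Int) ≤ (pvDist sr sc p0 : Int) := by positivity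
    have hstep : (pvStep sr sc M b p0 = b ∨
        (pvVal M p0.1 p0.2 = some 0 ∧ pvStep sr sc M b p0 = (pvDist sr sc p0 : Int))) ∧
        (pvStep sr sc M b p0 = -1 ∨ 0 ≤ pvStep sr sc M b p0) ∧
        (pvVal M p0.1 p0.2 = some 0 → pvStep sr sc M b p0 ≤ (pvDist sr sc p0 : Int) ∧
          0 ≤ pvStep sr sc M b p0) ∧
        (0 ≤ b → pvStep sr sc M b p0 ≤ b ∧ 0 ≤ pvStep sr sc M b p0) := by
      unfold pvStep
      rw [pvDistI]
      split_ifs with h1 h2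
      · refine ⟨Or.inr ⟨h1, rfl⟩, Or.inr hd0, fun _ => ⟨le_refl _, hd0⟩, fun hb0 => ⟨by omega, hd0⟩⟩
      · refine ⟨Or.inl rfl, hb, fun _ => ⟨by omega, by omega⟩, fun hb0 => ⟨le_refl _, hb0⟩⟩
      · exact ⟨Or.inl rfl, hb, by simp [h1], fun hb0 => ⟨le_refl _, hb0⟩⟩
    obtain ⟨hchoice, hb', hzd, hposb⟩ := hstep
    obtain ⟨C1, C2, C3, C4⟩ := ih (pvStep sr sc M b p0) hb'
    rw [List.foldl_cons]
    refine ⟨?_, ?_, ?_, ?_⟩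
    · rcases C1 with hC | ⟨p, hp, hz, hr⟩
      · rcases hchoice with h | ⟨hz0, hdd⟩
        · exact Or.inl (by rw [hC, h])
        · exact Or.inr ⟨p0, by simp, hz0, by rw [hC, hdd]⟩
      · exact Or.inr ⟨p, by simp [hp], hz, hr⟩
    · intro p hp hz
      rcases List.mem_cons.mp hp with rfl | hp'
      · obtain ⟨hle, hpos⟩ := hzd hz
        exact le_trans (C3 hpos) hle
      · exact C2 p hp' hz
    · intro hb0
      obtain ⟨hle, hpos⟩ := hposb hb0
      exact le_trans (C3 hpos) hle
    · rintro (⟨p, hp, hz⟩ | hb0)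
      · rcases List.mem_cons.mp hp with rfl | hp'
        · exact C4 (Or.inr (hzd hz).2)
        · exact C4 (Or.inl ⟨p, hp', hz⟩)
      · exact C4 (Or.inr (hposb hb0).2)

lemma pvAlt_none (sr sc R C : Int) (M : List (List Int)) (hin : pvInR R C (sr, sc))
    (hno : ∀ p, ¬ pvZero R C M p) : bfs_alt sr sc R C M = -1 := by
  have hc : ¬(sr < 0 ∨ R ≤ sr ∨ sc < 0 ∨ C ≤ sc) := by unfold pvInR at hin; omega
  rw [pvAlt_eq_fold sr sc R C M hc]
  obtain ⟨C1, _, _, _⟩ := pvFold_spec sr sc M (pvCL R C) (-1) (Or.inl rfl)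
  rcases C1 with h | ⟨p, hp, hz, _⟩
  · exact h
  · exact absurd ⟨(pvMem_pvCL R C p).mp hp, hz⟩ (hno p)

lemma pvAlt_min (sr sc R C : Int) (M : List (List Int)) (hin : pvInR R C (sr, sc))
    (p : Int × Int) (hp : pvZero R C M p)
    (hmin : ∀ q, pvZero R C M q → pvDist sr sc p ≤ pvDist sr sc q) :
    bfs_alt sr sc R C M = (pvDist sr sc p : Int) := by
  have hc : ¬(sr < 0 ∨ R ≤ sr ∨ sc < 0 ∨ C ≤ sc) := by unfold pvInR at hin; omega
  rw [pvAlt_eq_fold sr sc R C M hc]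
  obtain ⟨C1, C2, _, C4⟩ := pvFold_spec sr sc M (pvCL R C) (-1) (Or.inl rfl)
  have hpin : p ∈ pvCL R C := (pvMem_pvCL R C p).mpr hp.1
  have hpos : (0 : Int) ≤ (pvCL R C).foldl (pvStep sr sc M) (-1) :=
    C4 (Or.inl ⟨p, hpin, hp.2⟩)
  have hub := C2 p hpin hp.2
  rcases C1 with h | ⟨p', hp', hz', hr⟩
  · omega
  · have hzp' : pvZero R C M p' := ⟨(pvMem_pvCL R C p').mp hp', hz'⟩
    have := hmin p' hzp'
    rw [hr] at hub ⊢
    have : ((pvDist sr sc p : Nat) : Int) ≤ ((pvDist sr sc p' : Nat) : Int) := by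
      exact_mod_cast this
    omega

-- ===== VERDICT (by name: the statement is the Claim_ definition above) =====
theorem bfs_spec : Claim_equal_bfs := by
  unfold Claim_equal_bfs
  intro startRow startCol rowSize colSize matrix _ _
  unfold Spec_bfs bfs
  by_cases hin : pvInR rowSize colSize (startRow, startCol)
  · apply pvLoop_eq startRow startCol rowSize colSize matrix _ hin
    · exact pvAlt_none startRow startCol rowSize colSize matrix hin
    · exact fun p hp hm => pvAlt_min startRow startCol rowSize colSize matrix hin p hp hm
    · exact ⟨0, [(startRow, startCol, 0)], [], by simp,
        pvInv_init startRow startCol rowSize colSize matrix hin⟩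
  · have hc : startRow < 0 ∨ rowSize ≤ startRow ∨ startCol < 0 ∨ colSize ≤ startCol := by
      unfold pvInR at hin; omega
    rw [bfsLoop, if_pos hc, bfsLoop]
    unfold bfs_alt
    rw [if_pos hc]
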